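-- pv_equiv track=rewrite | github.com/tuckermclean/monolith-wiki | pipeline/stages/s3_kss.py | _count_domain_anchor_matches
-- ===== SOURCE A (Python) =====
-- def _count_domain_anchor_matches(categories: list[str], all_anchors: dict[str, list[str]]) -> int:
--     """Count total domain-anchor matches across all domains for an article."""
--     total = 0
--     for cat in categories:
--         cat_lower = cat.lower()
--         for anchor_list in all_anchors.values():
--             for anchor in anchor_list:
--                 if anchor in cat_lower:
--                     total += 1
--                     break
--     return total
-- ===== SOURCE B (Python) =====
-- def _count_domain_anchor_matches(categories: list[str], all_anchors: dict[str, list[str]]) -> int: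
--     """Count total domain-anchor matches across all domains for an article."""
--     lowered = [c.lower() for c in categories]
--     counts = {}
--     for cl in lowered:
--         counts[cl] = counts.get(cl, 0) + 1
--     total = 0
--     for anchors in all_anchors.values():
--         for cl, m in counts.items():
--             if any(a in cl for a in anchors):
--                 total += m
--     return total
-- ===== Notes on version B (the rewrite author's own statement) =====
-- stated objective: alternative
-- what changed: B groups the lowered categories into a multiplicity dict once and then, with the loops swapped to per-domain, tallies each distinct lowered category a single time (weighted by its count) instead of A's rescan of every anchor list for every category occurrence.
import Mathlib
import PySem

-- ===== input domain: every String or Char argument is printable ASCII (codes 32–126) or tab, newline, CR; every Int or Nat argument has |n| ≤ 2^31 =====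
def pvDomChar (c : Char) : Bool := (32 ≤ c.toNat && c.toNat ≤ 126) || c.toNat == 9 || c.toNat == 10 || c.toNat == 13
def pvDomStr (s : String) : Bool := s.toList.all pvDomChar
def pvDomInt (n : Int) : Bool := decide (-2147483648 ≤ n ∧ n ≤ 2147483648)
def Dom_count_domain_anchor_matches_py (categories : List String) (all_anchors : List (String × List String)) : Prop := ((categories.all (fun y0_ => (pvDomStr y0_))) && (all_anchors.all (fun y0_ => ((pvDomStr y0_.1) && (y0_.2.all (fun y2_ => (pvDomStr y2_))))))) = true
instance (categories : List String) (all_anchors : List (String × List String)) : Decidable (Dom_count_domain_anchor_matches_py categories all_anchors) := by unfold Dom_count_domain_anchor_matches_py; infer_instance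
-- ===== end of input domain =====

-- B replaces A's per-category rescan by a multiplicity dict over lowered categories (duplicates checked once,
-- loops swapped to per-domain); objective: alternative (same result, different traversal/grouping).

-- ===== PORT A =====
-- inner 'for anchor in anchor_list: if anchor in cat_lower: total += 1; break' — the break is the early return of 1
def pvAInner (cl : String) : List String → Int
  | [] => 0
  | a :: rest => if PySem.Str.isIn a cl then 1 else pvAInner cl rest

def count_domain_anchor_matches_py (categories : List String) (all_anchors : List (String × List String)) : Int :=
  categories.foldl (fun total cat =>
    let cl := PySem.Str.lower cat
    all_anchors.foldl (fun total p => total + pvAInner cl p.2) total) 0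

-- ===== PORT B =====
def count_domain_anchor_matches_py_alt (categories : List String) (all_anchors : List (String × List String)) : Int :=
  let lowered := categories.map PySem.Str.lower
  let counts := lowered.foldl (fun d cl => d.insert cl (d.getD cl 0 + 1)) PySem.Dict.empty
  all_anchors.foldl (fun total p =>
    counts.items.foldl (fun total kv =>
      if p.2.any (fun a => PySem.Str.isIn a kv.1) then total + kv.2 else total) total) 0

-- ===== PRECONDITION & SPEC =====
def Spec_count_domain_anchor_matches_py (categories : List String) (all_anchors : List (String × List String)) (out : Int) : Prop := out = count_domain_anchor_matches_py_alt categories all_anchors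
instance (categories : List String) (all_anchors : List (String × List String)) (out : Int) : Decidable (Spec_count_domain_anchor_matches_py categories all_anchors out) := by unfold Spec_count_domain_anchor_matches_py; infer_instance

-- ===== CLAIM (what is proved, stated in full; the proofs are below) =====
def Claim_equal_count_domain_anchor_matches_py : Prop := ∀ (categories : List String) (all_anchors : List (String × List String)), Dom_count_domain_anchor_matches_py categories all_anchors → Spec_count_domain_anchor_matches_py categories all_anchors (count_domain_anchor_matches_py categories all_anchors)

-- ===== LEMMAS AND PROOFS =====

-- 0/1 indicator: does any anchor of this domain occur in the lowered category?
def pvInd (anchors : List String) (cl : String) : Int :=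
  if anchors.any (fun a => PySem.Str.isIn a cl) then 1 else 0

theorem pvAInner_eq (cl : String) (al : List String) : pvAInner cl al = pvInd al cl := by
  induction al with
  | nil => simp [pvAInner, pvInd]
  | cons a rest ih =>
    cases h : PySem.Str.isIn a cl with
    | true =>
      have h' : PySem.Chars.isIn a.toList cl.toList = true := by simpa using h
      simp [pvAInner, pvInd, h']
    | false =>
      have h' : PySem.Chars.isIn a.toList cl.toList = false := by simpa using h
      simp [pvAInner, pvInd, h', ih]

-- B's inner loop in sum form
theorem pvFoldl_ite_add {α : Type} (xs : List α) (c : α → Bool) (v : α → Int) (t : Int) :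
    xs.foldl (fun t kv => if c kv then t + v kv else t) t
      = t + (xs.map (fun kv => if c kv then v kv else 0)).sum := by
  induction xs generalizing t with
  | nil => simp
  | cons x xs ih =>
    by_cases h : c x = true
    · simp [h, ih, add_assoc]
    · simp [h, ih]

-- double-sum swap
theorem pvSum_swap {α β : Type} (xs : List α) (ys : List β) (f : α → β → Int) :
    (xs.map (fun x => (ys.map (fun y => f x y)).sum)).sum
      = (ys.map (fun y => (xs.map (fun x => f x y)).sum)).sum := by
  induction xs with
  | nil => simp
  | cons x xs ih =>
    simp only [List.map_cons, List.sum_cons, ih]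
    rw [← PySem.List.sum_map_add_int]

-- picking the unique occurrence of x out of a nodup list
theorem pvSum_single {α : Type} [DecidableEq α] (S : List α) (x : α) (g : α → Int)
    (hnd : S.Nodup) (hx : x ∈ S) :
    (S.map (fun k => if k = x then g k else 0)).sum = g x := by
  induction S with
  | nil => simp at hx
  | cons y T ih =>
    rcases List.mem_cons.mp hx with h | h
    · subst h
      have hz : ∀ k ∈ T, (if k = x then g k else 0) = 0 := by
        intro k hk
        have : k ≠ x := fun e => (List.nodup_cons.mp hnd).1 (e ▸ hk)
        simp [this]
      simp [List.map_congr_left hz]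
    · have hny : y ≠ x := fun e => (List.nodup_cons.mp hnd).1 (e ▸ h)
      simp [hny, ih (List.nodup_cons.mp hnd).2 h]

-- grouping by multiplicities: sum over distinct keys of count·g equals the plain sum over the list
theorem pvSum_count {α : Type} [DecidableEq α] (L S : List α) (g : α → Int)
    (hnd : S.Nodup) (hsub : ∀ x ∈ L, x ∈ S) :
    (S.map (fun k => (L.count k : Int) * g k)).sum = (L.map g).sum := by
  induction L with
  | nil => simp
  | cons x L ih =>
    have hcount : ∀ k ∈ S, (((x :: L).count k : Int)) * g k
        = (L.count k : Int) * g k + (if k = x then g k else 0) := by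
      intro k _
      rw [List.count_cons]
      by_cases h : k = x
      · subst h; simp; ring
      · have h2 : (x == k) = false := by simp [Ne.symm h]
        rw [h2]
        simp [h]
    rw [List.map_congr_left hcount, PySem.List.sum_map_add_int,
        ih (fun y hy => hsub y (List.mem_cons_of_mem _ hy)),
        pvSum_single S x g hnd (hsub x (by simp)), List.map_cons, List.sum_cons]
    exact add_comm _ _

-- A as a double sum: over lowered categories, then domains
theorem pvA_eq (categories : List String) (all_anchors : List (String × List String)) :
    count_domain_anchor_matches_py categories all_anchors
      = ((categories.map PySem.Str.lower).map
          (fun cl => (all_anchors.map (fun p => pvInd p.2 cl)).sum)).sum := by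
  show (categories.foldl (fun total cat =>
      all_anchors.foldl (fun total p => total + pvAInner (PySem.Str.lower cat) p.2) total) 0) = _
  rw [PySem.List.foldl_congr_mem categories _
      (fun total cat => total + (all_anchors.map (fun p => pvInd p.2 (PySem.Str.lower cat))).sum) 0
      (fun t cat _ => by rw [PySem.List.foldl_add]; simp [pvAInner_eq])]
  rw [PySem.List.foldl_add]
  simp [List.map_map, Function.comp_def]

-- B as a double sum: over domains, then the distinct lowered categories with multiplicities
theorem pvB_eq (categories : List String) (all_anchors : List (String × List String)) :
    count_domain_anchor_matches_py_alt categories all_anchors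
      = (all_anchors.map (fun p =>
          ((PySem.Set.ofList (categories.map PySem.Str.lower) : List String).map
            (fun k => (((categories.map PySem.Str.lower).count k : Int)) * pvInd p.2 k)).sum)).sum := by
  unfold count_domain_anchor_matches_py_alt
  dsimp only
  rw [PySem.Dict.foldl_insert_getD_add_one_eq_counter]
  rw [PySem.List.foldl_congr_mem all_anchors _
      (fun total p => total +
        ((PySem.Dict.counter (categories.map PySem.Str.lower)).items.map (fun kv =>
          if p.2.any (fun a => PySem.Str.isIn a kv.1) then kv.2 else 0)).sum) 0
      (fun t p _ => pvFoldl_ite_add _ _ _ t)]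
  rw [PySem.List.foldl_add]
  simp only [zero_add, PySem.Dict.items_counter, List.map_map, Function.comp_def]
  apply congrArg
  apply List.map_congr_left
  intro p _
  apply congrArg
  apply List.map_congr_left
  intro k _
  simp [pvInd]

-- ===== VERDICT (by name: the statement is the Claim_ definition above) =====
theorem count_domain_anchor_matches_py_spec : Claim_equal_count_domain_anchor_matches_py := by
  intro categories all_anchors _
  unfold Spec_count_domain_anchor_matches_py
  rw [pvA_eq, pvB_eq, pvSum_swap]
  apply congrArg
  apply List.map_congr_left
  intro p _
  exact (pvSum_count (categories.map PySem.Str.lower)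
      (PySem.Set.ofList (categories.map PySem.Str.lower)) (pvInd p.2)
      (PySem.Set.nodup_ofList _) (fun x hx => (PySem.Set.mem_ofList _ x).mpr hx)).symm
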